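-- pv_equiv track=rewrite | github.com/rasmith81-live/AnalyticsEngine | scripts/objectModelSync/restructure_object_models.py | extract_relationships_from_uml
-- ===== SOURCE A (Python) =====
-- def extract_relationships_from_uml(uml_text: str) -> str:
--     """
--     Extract only relationship lines from UML, remove class definitions.
--
--     Keep lines like:
--         Customer "1" -- "*" Order : places
--         Customer "1" -- "1" CustomerHealthRecord : has
--
--     Remove lines like:
--         class Customer {
--         +id: Integer PK
--         }
--     """
--     lines = []
--     in_class_definition = False
--
--     for line in uml_text.split('\n'):
--         stripped = line.strip()
--
--         # Skip empty lines and PlantUML markers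
--         if not stripped or stripped in ['@startuml', '@enduml']:
--             continue
--
--         # Track class definition blocks
--         if stripped.startswith('class ') and '{' in stripped:
--             in_class_definition = True
--             continue
--
--         if in_class_definition:
--             if '}' in stripped:
--                 in_class_definition = False
--             continue
--
--         # Keep relationship lines (contain -- or ..)
--         if '--' in stripped or '..' in stripped:
--             lines.append(line)
--
--         # Keep comments and notes
--         elif stripped.startswith("'") or stripped.startswith('note'):
--             lines.append(line)
--
--     if not lines:
--         return ""
--
--     return "@startuml\n" + '\n'.join(lines) + "\n@enduml"
-- ===== SOURCE B (Python) =====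
-- def _strip_class_blocks(lines):
--     """Pass 1: remove class-definition blocks entirely."""
--     out = []
--     it = iter(lines)
--     for line in it:
--         s = line.strip()
--         if s.startswith('class ') and '{' in s:
--             # consume the block up to (and including) its closing '}' line;
--             # a further class-header line re-opens the block
--             for inner in it:
--                 t = inner.strip()
--                 if t.startswith('class ') and '{' in t:
--                     continue
--                 if '}' in t:
--                     break
--         else:
--             out.append(line)
--     return out
--
-- def _is_kept(line):
--     """Pass 2 predicate: relationship lines, comments and notes."""
--     s = line.strip()
--     return '--' in s or '..' in s or s.startswith("'") or s.startswith('note')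
--
-- def extract_relationships_from_uml(uml_text: str) -> str:
--     kept = [line for line in _strip_class_blocks(uml_text.split('\n')) if _is_kept(line)]
--     if not kept:
--         return ""
--     return "@startuml\n" + '\n'.join(kept) + "\n@enduml"
-- ===== Notes on version B (the rewrite author's own statement) =====
-- stated objective: alternative
-- what changed: A's single flag-driven pass is replaced by two differently-shaped passes: a first pass that deletes class-definition blocks (a nested inner loop consumes each block up to its closing '}'), then a stateless filter keeping relationship/comment/note lines; the empty/marker skip disappears because such lines never pass the filter.
import Mathlib
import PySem

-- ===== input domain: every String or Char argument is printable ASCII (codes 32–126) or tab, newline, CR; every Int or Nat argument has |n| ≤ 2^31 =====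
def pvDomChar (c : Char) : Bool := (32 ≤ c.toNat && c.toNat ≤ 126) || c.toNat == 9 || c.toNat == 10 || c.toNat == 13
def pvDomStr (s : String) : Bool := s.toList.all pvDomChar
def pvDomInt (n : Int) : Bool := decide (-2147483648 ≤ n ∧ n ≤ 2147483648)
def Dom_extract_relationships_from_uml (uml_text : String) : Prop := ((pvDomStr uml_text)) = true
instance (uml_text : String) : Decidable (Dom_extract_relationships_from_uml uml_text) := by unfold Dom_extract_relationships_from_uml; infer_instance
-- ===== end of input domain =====

-- B replaces A's single flag-driven pass by a class-block-removal pass followed by a stateless filter (alternative decomposition, same cost).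


-- ===== PORT A =====
-- one loop over the lines with state (collected lines, in_class_definition flag)
def pvAStep (st : List String × Bool) (line : String) : List String × Bool :=
  let stripped := PySem.Str.strip line
  if stripped = "" || stripped = "@startuml" || stripped = "@enduml" then st
  else if PySem.Str.startswith stripped "class " && PySem.Str.isIn "{" stripped then (st.1, true)
  else if st.2 then (if PySem.Str.isIn "}" stripped then (st.1, false) else st)
  else if PySem.Str.isIn "--" stripped || PySem.Str.isIn ".." stripped then (st.1 ++ [line], st.2)
  else if PySem.Str.startswith stripped "'" || PySem.Str.startswith stripped "note" then (st.1 ++ [line], st.2)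
  else st

def extract_relationships_from_uml (uml_text : String) : String :=
  let lines := (((PySem.Str.split? uml_text "\n").getD []).foldl pvAStep ([], false)).1
  if lines = [] then ""
  else "@startuml\n" ++ PySem.Str.join "\n" lines ++ "\n@enduml"

-- ===== PORT B =====
-- pass 1 helper: the inner loop of _strip_class_blocks — consume a block up to its closing '}' line
def pvDropBlk (ls : List String) : List String :=
  match ls with
  | [] => []
  | l :: rest =>
    let t := PySem.Str.strip l
    if PySem.Str.startswith t "class " && PySem.Str.isIn "{" t then pvDropBlk rest
    else if PySem.Str.isIn "}" t then rest
    else pvDropBlk rest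

theorem pvDropBlk_length_le (ls : List String) : (pvDropBlk ls).length ≤ ls.length := by
  induction ls with
  | nil => simp [pvDropBlk]
  | cons l rest ih =>
    simp only [pvDropBlk]
    split
    · exact Nat.le_succ_of_le ih
    · split
      · exact Nat.le_succ _
      · exact Nat.le_succ_of_le ih

-- pass 1: _strip_class_blocks
def pvStripBlocks (ls : List String) : List String :=
  match ls with
  | [] => []
  | l :: rest =>
    let s := PySem.Str.strip l
    if PySem.Str.startswith s "class " && PySem.Str.isIn "{" s then pvStripBlocks (pvDropBlk rest)
    else l :: pvStripBlocks rest
termination_by ls.length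
decreasing_by
  · exact Nat.lt_succ_of_le (pvDropBlk_length_le rest)
  · exact Nat.lt_succ_self _

-- pass 2 predicate: _is_kept
def pvIsKept (line : String) : Bool :=
  let s := PySem.Str.strip line
  PySem.Str.isIn "--" s || PySem.Str.isIn ".." s || PySem.Str.startswith s "'" || PySem.Str.startswith s "note"

def extract_relationships_from_uml_alt (uml_text : String) : String :=
  let kept := (pvStripBlocks ((PySem.Str.split? uml_text "\n").getD [])).filter pvIsKept
  if kept = [] then ""
  else "@startuml\n" ++ PySem.Str.join "\n" kept ++ "\n@enduml"

-- ===== PRECONDITION & SPEC =====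
def Spec_extract_relationships_from_uml (uml_text : String) (out : String) : Prop := out = extract_relationships_from_uml_alt uml_text
instance (uml_text : String) (out : String) : Decidable (Spec_extract_relationships_from_uml uml_text out) := by unfold Spec_extract_relationships_from_uml; infer_instance

-- ===== CLAIM (what is proved, stated in full; the proofs are below) =====
def Claim_equal_extract_relationships_from_uml : Prop := ∀ (uml_text : String), Dom_extract_relationships_from_uml uml_text → Spec_extract_relationships_from_uml uml_text (extract_relationships_from_uml uml_text)

-- ===== LEMMAS AND PROOFS =====

-- a "skip" line ("", "@startuml", "@enduml") is not a class header, contains no '}', and is not a kept line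
theorem pvSkip_facts (s : String)
    (h : (decide (s = "") || decide (s = "@startuml") || decide (s = "@enduml")) = true) :
    (PySem.Str.startswith s "class " && PySem.Str.isIn "{" s) = false ∧
    PySem.Str.isIn "}" s = false ∧
    (PySem.Str.isIn "--" s || PySem.Str.isIn ".." s || PySem.Str.startswith s "'" || PySem.Str.startswith s "note") = false := by
  simp only [Bool.or_eq_true, decide_eq_true_eq] at h
  rcases h with (h | h) | h <;> subst h <;> exact ⟨by decide, by decide, by decide⟩

-- A's fold in the in_class state equals the fold from the clean state on the lines after the block
theorem pvFold_true (ls : List String) (acc : List String) :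
    (ls.foldl pvAStep (acc, true)).1 = ((pvDropBlk ls).foldl pvAStep (acc, false)).1 := by
  induction ls generalizing acc with
  | nil => rfl
  | cons l rest ih =>
    simp only [List.foldl_cons, pvAStep, pvDropBlk]
    by_cases h2 : (PySem.Str.startswith (PySem.Str.strip l) "class " && PySem.Str.isIn "{" (PySem.Str.strip l)) = true
    · simp only [h2, if_true, ite_self]
      exact ih acc
    · simp only [h2, Bool.false_eq_true, ite_false, if_true]
      by_cases h3 : PySem.Str.isIn "}" (PySem.Str.strip l) = true
      · have hskip : (decide (PySem.Str.strip l = "") || decide (PySem.Str.strip l = "@startuml") ||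
            decide (PySem.Str.strip l = "@enduml")) = false := by
          cases hb : (decide (PySem.Str.strip l = "") || decide (PySem.Str.strip l = "@startuml") ||
              decide (PySem.Str.strip l = "@enduml")) with
          | false => rfl
          | true => rw [(pvSkip_facts _ hb).2.1] at h3; exact absurd h3 (by simp)
        simp only [hskip, Bool.false_eq_true, ite_false, h3, if_true]
      · simp only [h3, Bool.false_eq_true, ite_false, ite_self]
        exact ih acc

-- A's fold in the clean state collects exactly B's filtered block-free lines
theorem pvFold_false (ls : List String) : ∀ (acc : List String),
    (ls.foldl pvAStep (acc, false)).1 = acc ++ (pvStripBlocks ls).filter pvIsKept := by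
  induction ls using pvStripBlocks.induct with
  | case1 => intro acc; simp [pvStripBlocks]
  | case2 l rest s hcls ih =>
    intro acc
    have hcls' : (PySem.Str.startswith (PySem.Str.strip l) "class " && PySem.Str.isIn "{" (PySem.Str.strip l)) = true := hcls
    simp only [List.foldl_cons, pvAStep, pvStripBlocks, hcls', if_true]
    have hskip : (decide (PySem.Str.strip l = "") || decide (PySem.Str.strip l = "@startuml") ||
        decide (PySem.Str.strip l = "@enduml")) = false := by
      cases hb : (decide (PySem.Str.strip l = "") || decide (PySem.Str.strip l = "@startuml") ||
          decide (PySem.Str.strip l = "@enduml")) with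
      | false => rfl
      | true => rw [(pvSkip_facts _ hb).1] at hcls'; exact absurd hcls' (by simp)
    simp only [hskip, Bool.false_eq_true, ite_false]
    rw [pvFold_true rest acc]
    exact ih acc
  | case3 l rest s hcls ih =>
    intro acc
    have hcls' : (PySem.Str.startswith (PySem.Str.strip l) "class " && PySem.Str.isIn "{" (PySem.Str.strip l)) = false :=
      Bool.eq_false_iff.mpr hcls
    have hstrip : pvStripBlocks (l :: rest) = l :: pvStripBlocks rest := by
      simp only [pvStripBlocks, hcls', Bool.false_eq_true, ite_false]
    simp only [List.foldl_cons, pvAStep, hcls', Bool.false_eq_true, ite_false, hstrip,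
      List.filter_cons]
    by_cases hskip : (decide (PySem.Str.strip l = "") || decide (PySem.Str.strip l = "@startuml") ||
        decide (PySem.Str.strip l = "@enduml")) = true
    · have hk : pvIsKept l = false := by
        simp only [pvIsKept]
        exact (pvSkip_facts _ hskip).2.2
      simp only [hskip, if_true, hk, Bool.false_eq_true, ite_false]
      exact ih acc
    · have hskip' : (decide (PySem.Str.strip l = "") || decide (PySem.Str.strip l = "@startuml") ||
          decide (PySem.Str.strip l = "@enduml")) = false := Bool.eq_false_iff.mpr hskip
      simp only [hskip', Bool.false_eq_true, ite_false]
      by_cases hrel : (PySem.Str.isIn "--" (PySem.Str.strip l) || PySem.Str.isIn ".." (PySem.Str.strip l)) = true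
      · have hk : pvIsKept l = true := by
          rcases Bool.or_eq_true_iff.mp hrel with h | h <;> (simp [pvIsKept]; simp at h)
          · exact Or.inl (Or.inl (Or.inl h))
          · exact Or.inl (Or.inl (Or.inr h))
        simp only [hrel, if_true, hk]
        rw [ih (acc ++ [l])]
        simp
      · have hrel' : (PySem.Str.isIn "--" (PySem.Str.strip l) || PySem.Str.isIn ".." (PySem.Str.strip l)) = false :=
          Bool.eq_false_iff.mpr hrel
        simp only [hrel', Bool.false_eq_true, ite_false]
        by_cases hnote : (PySem.Str.startswith (PySem.Str.strip l) "'" || PySem.Str.startswith (PySem.Str.strip l) "note") = true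
        · have hk : pvIsKept l = true := by
            rcases Bool.or_eq_true_iff.mp hnote with h | h <;> (simp [pvIsKept]; simp at h)
            · exact Or.inl (Or.inr h)
            · exact Or.inr h
          simp only [hnote, if_true, hk]
          rw [ih (acc ++ [l])]
          simp
        · have hnote' : (PySem.Str.startswith (PySem.Str.strip l) "'" || PySem.Str.startswith (PySem.Str.strip l) "note") = false :=
            Bool.eq_false_iff.mpr hnote
          have hk : pvIsKept l = false := by
            obtain ⟨h1, h2⟩ := Bool.or_eq_false_iff.mp hrel'
            obtain ⟨h3, h4⟩ := Bool.or_eq_false_iff.mp hnote'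
            simp [pvIsKept]
            simp at h1 h2 h3 h4
            exact ⟨⟨⟨h1, h2⟩, h3⟩, h4⟩
          simp only [hnote', Bool.false_eq_true, ite_false, hk]
          exact ih acc

-- ===== VERDICT (by name: the statement is the Claim_ definition above) =====
theorem extract_relationships_from_uml_spec : Claim_equal_extract_relationships_from_uml := by
  intro uml_text _
  unfold Spec_extract_relationships_from_uml extract_relationships_from_uml extract_relationships_from_uml_alt
  rw [pvFold_false ((PySem.Str.split? uml_text "\n").getD []) []]
  simp
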